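-- pv_equiv track=rewrite | github.com/AdamZhouSE/pythonHomework | Code/CodeRecords/2785/60889/276755.py | canReturn
-- ===== SOURCE A (Python) =====
-- def canReturn(degrees,nowDegree):
--     if len(degrees)==0:
--         if nowDegree%360 == 0:
--             return True
--         else:
--             return False
--     else:
--         degree = degrees.pop(0)
--         return canReturn(degrees.copy(),nowDegree+degree) or canReturn(degrees.copy(),nowDegree-degree)
-- ===== SOURCE B (Python) =====
-- def canReturn(degrees, nowDegree):
--     reachable = {nowDegree % 360}
--     for d in degrees:
--         reachable = {(r + d) % 360 for r in reachable} | {(r - d) % 360 for r in reachable}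
--     return 0 in reachable
-- ===== Notes on version B (the rewrite author's own statement) =====
-- stated objective: alternative
-- what changed: Replaced the try-both-signs recursion (exponential worst case, but often short-circuiting early) with a dynamic program over the set of residues mod 360 reachable after each degree, answering by membership of 0.
import Mathlib
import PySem

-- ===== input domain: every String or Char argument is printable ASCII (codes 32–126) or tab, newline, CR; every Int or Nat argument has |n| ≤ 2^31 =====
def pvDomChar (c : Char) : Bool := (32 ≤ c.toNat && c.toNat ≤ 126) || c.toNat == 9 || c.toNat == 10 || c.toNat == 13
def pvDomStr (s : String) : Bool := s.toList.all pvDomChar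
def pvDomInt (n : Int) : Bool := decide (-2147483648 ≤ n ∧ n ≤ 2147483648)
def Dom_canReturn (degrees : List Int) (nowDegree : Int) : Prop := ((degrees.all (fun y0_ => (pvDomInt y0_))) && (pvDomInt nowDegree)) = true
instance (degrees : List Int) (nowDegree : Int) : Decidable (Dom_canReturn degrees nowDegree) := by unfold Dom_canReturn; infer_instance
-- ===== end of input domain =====

-- B replaces A's ±-sign recursion by a DP over the set of residues mod 360 (an alternative algorithm).
-- Note: Python A mutates its 'degrees' argument (pop(0)); the equivalence proved here is about the return value only.

-- ===== PORT A =====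
def canReturn (degrees : List Int) (nowDegree : Int) : Bool :=
  match degrees with
  | [] => if PySem.Int.mod nowDegree 360 = 0 then true else false
  | degree :: rest =>
      canReturn rest (nowDegree + degree) || canReturn rest (nowDegree - degree)

-- ===== PORT B =====
-- one loop step: new set of reachable residues
def stepRes (S : PySem.Set Int) (d : Int) : PySem.Set Int :=
  PySem.Set.union (PySem.Set.ofList (S.map (fun r => PySem.Int.mod (r + d) 360)))
                  (PySem.Set.ofList (S.map (fun r => PySem.Int.mod (r - d) 360)))

def canReturn_alt (degrees : List Int) (nowDegree : Int) : Bool :=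
  PySem.Set.contains
    (degrees.foldl stepRes (PySem.Set.ofList [PySem.Int.mod nowDegree 360])) 0

-- ===== PRECONDITION & SPEC =====
def Spec_canReturn (degrees : List Int) (nowDegree : Int) (out : Bool) : Prop := out = canReturn_alt degrees nowDegree
instance (degrees : List Int) (nowDegree : Int) (out : Bool) : Decidable (Spec_canReturn degrees nowDegree out) := by unfold Spec_canReturn; infer_instance

-- ===== CLAIM (what is proved, stated in full; the proofs are below) =====
def Claim_equal_canReturn : Prop := ∀ (degrees : List Int) (nowDegree : Int), Dom_canReturn degrees nowDegree → Spec_canReturn degrees nowDegree (canReturn degrees nowDegree)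

-- ===== LEMMAS AND PROOFS =====

-- A's base case as an iff
theorem canReturn_nil_iff (r : Int) :
    canReturn [] r = true ↔ PySem.Int.mod r 360 = 0 := by
  unfold canReturn
  split_ifs with h
  · exact iff_of_true rfl h
  · exact iff_of_false (by simp) h

-- A's result depends only on nowDegree modulo 360
theorem canReturn_congr (degrees : List Int) (a b : Int)
    (h : PySem.Int.mod a 360 = PySem.Int.mod b 360) :
    canReturn degrees a = canReturn degrees b := by
  induction degrees generalizing a b with
  | nil => simp only [canReturn, h]
  | cons d rest ih =>
      simp only [canReturn]
      have h' : a % 360 = b % 360 := by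
        rw [PySem.Int.mod_eq_emod_of_pos (by norm_num),
            PySem.Int.mod_eq_emod_of_pos (b := (360:Int)) (by norm_num)] at h
        exact h
      rw [ih (a + d) (b + d), ih (a - d) (b - d)] <;>
        · rw [PySem.Int.mod_eq_emod_of_pos (by norm_num),
              PySem.Int.mod_eq_emod_of_pos (b := (360:Int)) (by norm_num)]
          omega

theorem mem_stepRes (S : PySem.Set Int) (d r : Int) :
    r ∈ stepRes S d ↔ ∃ s ∈ S, r = PySem.Int.mod (s + d) 360 ∨ r = PySem.Int.mod (s - d) 360 := by
  simp only [stepRes, PySem.Set.mem_union, PySem.Set.mem_ofList, List.mem_map]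
  constructor
  · rintro (⟨s, hs, rfl⟩ | ⟨s, hs, rfl⟩)
    · exact ⟨s, hs, Or.inl rfl⟩
    · exact ⟨s, hs, Or.inr rfl⟩
  · rintro ⟨s, hs, rfl | rfl⟩
    · exact Or.inl ⟨s, hs, rfl⟩
    · exact Or.inr ⟨s, hs, rfl⟩

-- every residue the DP keeps lies in [0, 360)
theorem foldl_stepRes_bounds (degrees : List Int) (S : PySem.Set Int)
    (hS : ∀ r ∈ S, 0 ≤ r ∧ r < 360) :
    ∀ r ∈ degrees.foldl stepRes S, 0 ≤ r ∧ r < 360 := by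
  induction degrees generalizing S with
  | nil => simpa using hS
  | cons d rest ih =>
      intro r hr
      refine ih (stepRes S d) ?_ r hr
      intro x hx
      rcases (mem_stepRes S d x).1 hx with ⟨s, _, rfl | rfl⟩ <;>
        exact ⟨PySem.Int.mod_nonneg _ (by norm_num), PySem.Int.mod_lt _ (by norm_num)⟩

-- mod-360 is idempotent, so A is invariant under reducing its accumulator mod 360
theorem mod_mod (a : Int) :
    PySem.Int.mod (PySem.Int.mod a 360) 360 = PySem.Int.mod a 360 := by
  rw [PySem.Int.mod_eq_emod_of_pos (by norm_num),
      PySem.Int.mod_eq_emod_of_pos (b := (360:Int)) (by norm_num)]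
  exact Int.emod_emod_of_dvd a dvd_rfl

theorem canReturn_mod (rest : List Int) (x : Int) :
    canReturn rest (PySem.Int.mod x 360) = canReturn rest x :=
  canReturn_congr rest _ _ (mod_mod x)

-- main DP/recursion correspondence
theorem foldl_stepRes_spec (degrees : List Int) (S : PySem.Set Int) :
    (∃ r ∈ degrees.foldl stepRes S, PySem.Int.mod r 360 = 0) ↔
      (∃ r ∈ S, canReturn degrees r = true) := by
  induction degrees generalizing S with
  | nil =>
      simp only [List.foldl_nil]
      exact exists_congr fun r => and_congr_right fun _ => (canReturn_nil_iff r).symm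
  | cons d rest ih =>
      simp only [List.foldl_cons]
      rw [ih]
      constructor
      · rintro ⟨r, hr, h⟩
        rcases (mem_stepRes S d r).1 hr with ⟨s, hs, rfl | rfl⟩
        · refine ⟨s, hs, ?_⟩
          simp only [canReturn, Bool.or_eq_true]
          left
          rw [← canReturn_mod rest (s + d)]
          exact h
        · refine ⟨s, hs, ?_⟩
          simp only [canReturn, Bool.or_eq_true]
          right
          rw [← canReturn_mod rest (s - d)]
          exact h
      · rintro ⟨s, hs, h⟩
        simp only [canReturn, Bool.or_eq_true] at h
        rcases h with h | h
        · refine ⟨PySem.Int.mod (s + d) 360, (mem_stepRes S d _).2 ⟨s, hs, Or.inl rfl⟩, ?_⟩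
          rw [canReturn_mod rest (s + d)]
          exact h
        · refine ⟨PySem.Int.mod (s - d) 360, (mem_stepRes S d _).2 ⟨s, hs, Or.inr rfl⟩, ?_⟩
          rw [canReturn_mod rest (s - d)]
          exact h

-- ===== VERDICT (by name: the statement is the Claim_ definition above) =====
theorem canReturn_spec : Claim_equal_canReturn := by
  intro degrees nowDegree _
  unfold Spec_canReturn canReturn_alt
  rw [Bool.eq_iff_iff, PySem.Set.contains_iff]
  set S0 : PySem.Set Int := PySem.Set.ofList [PySem.Int.mod nowDegree 360] with hS0
  have hmem0 : PySem.Int.mod nowDegree 360 ∈ S0 := by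
    rw [hS0, PySem.Set.mem_ofList]
    exact List.mem_singleton.2 rfl
  have hb : ∀ r ∈ degrees.foldl stepRes S0, 0 ≤ r ∧ r < 360 := by
    refine foldl_stepRes_bounds degrees S0 ?_
    intro r hr
    rw [hS0, PySem.Set.mem_ofList] at hr
    rw [List.mem_singleton.1 hr]
    exact ⟨PySem.Int.mod_nonneg _ (by norm_num), PySem.Int.mod_lt _ (by norm_num)⟩
  constructor
  · intro h
    have hex : ∃ r ∈ S0, canReturn degrees r = true :=
      ⟨PySem.Int.mod nowDegree 360, hmem0, by rw [canReturn_mod]; exact h⟩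
    rcases (foldl_stepRes_spec degrees S0).2 hex with ⟨r, hr, hmod⟩
    have hbr := hb r hr
    have hr0 : r = 0 := by
      rw [PySem.Int.mod_eq_emod_of_pos (by norm_num)] at hmod
      omega
    exact hr0 ▸ hr
  · intro h
    rcases (foldl_stepRes_spec degrees S0).1 ⟨0, h, by decide⟩ with ⟨r, hr, hc⟩
    rw [hS0, PySem.Set.mem_ofList] at hr
    rw [List.mem_singleton.1 hr] at hc
    rw [canReturn_mod] at hc
    exact hc
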